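-- pv_equiv track=rewrite | github.com/adamUpchurch/leo_translate | controller/textProcessing.py | clean_this
-- ===== SOURCE A (Python) =====
-- def clean_this(text):
--   split_text = text[1:-1].split(',')
--   text_to_return = []
--   for text in split_text:
--     clean_text = text.strip()
--     clean_text = clean_text.replace('&quot;','"')
--     clean_text = clean_text.replace('&apos;',"'")
--     clean_text = clean_text.replace('&#x27;',"'")
--     clean_text = clean_text.replace('&#x27;','"')
--     text_to_return.append(clean_text)
--
--   return text_to_return
-- ===== SOURCE B (Python) =====
-- def clean_this(text):
--     # One left-to-right scan per token replaces the entities in a single pass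
--     # (A's fourth replace is dead: no '&#x27;' survives the third).
--     reps = (('&quot;', '"'), ('&apos;', "'"), ('&#x27;', "'"))
--     out = []
--     for tok in text[1:-1].split(','):
--         tok = tok.strip()
--         buf = []
--         i = 0
--         while i < len(tok):
--             for ent, ch in reps:
--                 if tok.startswith(ent, i):
--                     buf.append(ch)
--                     i += len(ent)
--                     break
--             else:
--                 buf.append(tok[i])
--                 i += 1
--         out.append(''.join(buf))
--     return out
-- ===== Notes on version B (the rewrite author's own statement) =====
-- stated objective: alternative
-- what changed: Each stripped token is rewritten by one left-to-right scan that substitutes the three HTML entities as it reaches them, instead of four chained full-string replace passes (the fourth being dead code); equality is proved from the fact that entity occurrences never overlap and replacements never create new occurrences.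
import Mathlib
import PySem

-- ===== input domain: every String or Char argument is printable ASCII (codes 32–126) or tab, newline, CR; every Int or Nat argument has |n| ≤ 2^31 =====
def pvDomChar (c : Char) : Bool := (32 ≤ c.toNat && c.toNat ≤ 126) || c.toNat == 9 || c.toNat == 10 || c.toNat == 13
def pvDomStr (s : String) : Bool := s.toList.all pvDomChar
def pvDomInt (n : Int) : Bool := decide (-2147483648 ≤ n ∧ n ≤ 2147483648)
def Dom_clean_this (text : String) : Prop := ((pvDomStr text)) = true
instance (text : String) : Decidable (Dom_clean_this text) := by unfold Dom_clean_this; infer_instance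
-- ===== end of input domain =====

set_option maxRecDepth 10000


-- B replaces A's four chained full-string .replace passes (the fourth is dead code)
-- by one left-to-right scan per token substituting the three entities; return values proved equal.

-- ===== PORT A =====
-- text[1:-1].split(','): sep "," is a nonempty literal, so PySem.Str.split? is always `some`;
-- `.getD []` only discharges the impossible `none`.
def clean_this (text : String) : List String :=
  let split_text := (PySem.Str.split? (PySem.Str.slice text (some 1) (some (-1))) ",").getD []
  split_text.foldl (fun text_to_return t =>
    let c0 := PySem.Str.strip t
    let c1 := PySem.Str.replace c0 "&quot;" "\""
    let c2 := PySem.Str.replace c1 "&apos;" "'"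
    let c3 := PySem.Str.replace c2 "&#x27;" "'"
    let c4 := PySem.Str.replace c3 "&#x27;" "\""
    text_to_return ++ [c4]) []

-- ===== PORT B =====
-- the inner while-loop of Source B: one pass, trying the three entities at each position
def substEnt : List Char → List Char
  | [] => []
  | c :: t =>
    if ['&','q','u','o','t',';'].isPrefixOf (c :: t) then '"' :: substEnt (t.drop 5)
    else if ['&','a','p','o','s',';'].isPrefixOf (c :: t) then '\'' :: substEnt (t.drop 5)
    else if ['&','#','x','2','7',';'].isPrefixOf (c :: t) then '\'' :: substEnt (t.drop 5)
    else c :: substEnt t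
  termination_by l => l.length
  decreasing_by
  · simp only [List.length_drop, List.length_cons]; omega
  · simp only [List.length_drop, List.length_cons]; omega
  · simp only [List.length_drop, List.length_cons]; omega
  · simp

def clean_this_alt (text : String) : List String :=
  ((PySem.Str.split? (PySem.Str.slice text (some 1) (some (-1))) ",").getD []).foldl
    (fun out t => out ++ [String.ofList (substEnt (PySem.Chars.strip t.toList))]) []

-- ===== PRECONDITION & SPEC =====
def Spec_clean_this (text : String) (out : List String) : Prop := out = clean_this_alt text
instance (text : String) (out : List String) : Decidable (Spec_clean_this text out) := by unfold Spec_clean_this; infer_instance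

-- ===== CLAIM (what is proved, stated in full; the proofs are below) =====
def Claim_equal_clean_this : Prop := ∀ (text : String), Dom_clean_this text → Spec_clean_this text (clean_this text)

-- ===== LEMMAS AND PROOFS =====

-- `rep o old new` = Python's s.replace(o::old, new) (pattern split head/tail so recursion decreases)
def rep (o : Char) (old new : List Char) : List Char → List Char
  | [] => []
  | c :: t =>
    if (o :: old).isPrefixOf (c :: t) then new ++ rep o old new (t.drop old.length)
    else c :: rep o old new t
  termination_by l => l.length
  decreasing_by
  · simp only [List.length_drop, List.length_cons]; omega
  · simp

lemma rep_nil (o : Char) (old new : List Char) : rep o old new [] = [] := by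
  rw [rep]

lemma rep_cons_pos (o : Char) (old new : List Char) (c : Char) (t : List Char)
    (h : (o :: old).isPrefixOf (c :: t) = true) :
    rep o old new (c :: t) = new ++ rep o old new (t.drop old.length) := by
  rw [rep, if_pos h]

lemma rep_cons_neg (o : Char) (old new : List Char) (c : Char) (t : List Char)
    (h : ¬ (o :: old).isPrefixOf (c :: t) = true) :
    rep o old new (c :: t) = c :: rep o old new t := by
  rw [rep, if_neg h]

-- head mismatch: the scan steps over c
lemma rep_pass (o : Char) (old new : List Char) (c : Char) (t : List Char)
    (h : (o == c) = false) : rep o old new (c :: t) = c :: rep o old new t := by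
  apply rep_cons_neg
  simp [List.isPrefixOf, h]

-- replace.go with enough fuel computes rep
lemma go_eq_rep (o : Char) (old new : List Char) :
    ∀ fuel l acc, l.length ≤ fuel →
      PySem.Chars.replace.go (o :: old) new fuel l acc = acc.reverse ++ rep o old new l := by
  intro fuel
  induction fuel with
  | zero =>
    intro l acc hl
    have : l = [] := List.eq_nil_of_length_eq_zero (Nat.le_zero.mp hl)
    subst this
    rw [PySem.Chars.replace.go.eq_def]
    simp [rep_nil]
  | succ m ih =>
    intro l acc hl
    cases l with
    | nil =>
      rw [PySem.Chars.replace.go.eq_def]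
      simp [rep_nil]
    | cons c t =>
      rw [PySem.Chars.replace.go.eq_def]
      by_cases h : (o :: old).isPrefixOf (c :: t) = true
      · simp only [h, if_true]
        have hlen : (List.drop (o :: old).length (c :: t)).length ≤ m := by
          have h2 : t.length ≤ m := by simpa using hl
          simp only [List.length_drop, List.length_cons]
          omega
        rw [ih _ _ hlen, rep_cons_pos o old new c t h]
        simp [List.drop_succ_cons]
      · simp only [h]
        have hlen : t.length ≤ m := by simpa using hl
        rw [ih _ _ hlen, rep_cons_neg o old new c t h]
        simp

lemma replace_eq_rep (o : Char) (old new : List Char) (s : List Char) :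
    PySem.Chars.replace s (o :: old) new = rep o old new s := by
  rw [PySem.Chars.replace]
  simp only [List.isEmpty_cons, if_false, Bool.false_eq_true]
  simpa using go_eq_rep o old new s.length s [] (Nat.le_refl _)

-- a pattern avoiding every char of `new` that is a prefix of the replaced string
-- was already a prefix of the original string
lemma rep_prefix_mono (o : Char) (old : List Char) (e : Char) (new : List Char) :
    ∀ n t, t.length ≤ n → ∀ p : List Char, (∀ d ∈ (e :: new), d ∉ p) →
      p <+: rep o old (e :: new) t → p <+: t := by
  intro n
  induction n with
  | zero =>
    intro t ht p _ hp
    have : t = [] := List.eq_nil_of_length_eq_zero (Nat.le_zero.mp ht)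
    subst this
    rwa [rep_nil] at hp
  | succ m ih =>
    intro t ht p hav hp
    cases t with
    | nil => rwa [rep_nil] at hp
    | cons c t' =>
      cases p with
      | nil => exact List.nil_prefix
      | cons d p' =>
        by_cases h : (o :: old).isPrefixOf (c :: t') = true
        · rw [rep_cons_pos _ _ _ _ _ h] at hp
          have hd : d = e := (List.cons_prefix_cons.mp hp).1
          exact absurd (by simp) (fun hmem => hav e hmem (by simp [← hd]))
        · rw [rep_cons_neg _ _ _ _ _ h] at hp
          obtain ⟨hd, hp'⟩ := List.cons_prefix_cons.mp hp
          have ht' : t'.length ≤ m := by simpa using Nat.lt_succ_iff.mp (by simpa using ht)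
          have : p' <+: t' :=
            ih t' ht' p' (fun x hx hmem => hav x hx (List.mem_cons_of_mem _ hmem)) hp'
          exact List.cons_prefix_cons.mpr ⟨hd, this⟩

-- the four chained replaces of A equal B's single pass
lemma master : ∀ n s, s.length ≤ n →
    rep '&' ['#','x','2','7',';'] ['"']
      (rep '&' ['#','x','2','7',';'] ['\'']
        (rep '&' ['a','p','o','s',';'] ['\'']
          (rep '&' ['q','u','o','t',';'] ['"'] s))) = substEnt s := by
  intro n
  induction n with
  | zero =>
    intro s hs
    have : s = [] := List.eq_nil_of_length_eq_zero (Nat.le_zero.mp hs)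
    subst this
    simp [rep_nil, substEnt]
  | succ m ih =>
    intro s hs
    cases s with
    | nil => simp [rep_nil, substEnt]
    | cons c t =>
      by_cases hq : (['&','q','u','o','t',';'] : List Char).isPrefixOf (c :: t) = true
      · obtain ⟨u, hu⟩ := (List.isPrefixOf_iff_prefix.mp hq)
        have hct : c :: t = '&'::'q'::'u'::'o'::'t'::';'::u := hu.symm
        have hlen : u.length ≤ m := by
          have h := hs; rw [hct] at h; simp only [List.length_cons] at h; omega
        have e1 : rep '&' ['q','u','o','t',';'] ['"'] ('&'::'q'::'u'::'o'::'t'::';'::u)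
            = '"' :: rep '&' ['q','u','o','t',';'] ['"'] u := by
          rw [rep_cons_pos _ _ _ _ _ (by simp [List.isPrefixOf])]
          rw [show List.drop (['q','u','o','t',';'] : List Char).length
                ('q'::'u'::'o'::'t'::';'::u) = u from rfl]
          simp
        rw [hct, e1,
            rep_pass _ _ _ _ _ (by decide), rep_pass _ _ _ _ _ (by decide),
            rep_pass _ _ _ _ _ (by decide)]
        rw [substEnt, if_pos (by simp [List.isPrefixOf])]
        rw [show List.drop 5 ('q'::'u'::'o'::'t'::';'::u) = u from rfl]
        exact congrArg _ (ih u hlen)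
      · by_cases ha : (['&','a','p','o','s',';'] : List Char).isPrefixOf (c :: t) = true
        · obtain ⟨u, hu⟩ := (List.isPrefixOf_iff_prefix.mp ha)
          have hct : c :: t = '&'::'a'::'p'::'o'::'s'::';'::u := hu.symm
          have hlen : u.length ≤ m := by
            have h := hs; rw [hct] at h; simp only [List.length_cons] at h; omega
          -- the first replace steps over all six chars
          have e1 : rep '&' ['q','u','o','t',';'] ['"'] ('&'::'a'::'p'::'o'::'s'::';'::u)
              = '&'::'a'::'p'::'o'::'s'::';':: rep '&' ['q','u','o','t',';'] ['"'] u := by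
            rw [rep_cons_neg _ _ _ _ _ (by rw [← hct]; exact hq),
                rep_pass _ _ _ _ _ (by decide), rep_pass _ _ _ _ _ (by decide),
                rep_pass _ _ _ _ _ (by decide), rep_pass _ _ _ _ _ (by decide),
                rep_pass _ _ _ _ _ (by decide)]
          -- the second replace matches at the front
          have e2 : rep '&' ['a','p','o','s',';'] ['\'']
                ('&'::'a'::'p'::'o'::'s'::';':: rep '&' ['q','u','o','t',';'] ['"'] u)
              = '\'' :: rep '&' ['a','p','o','s',';'] ['\'']
                  (rep '&' ['q','u','o','t',';'] ['"'] u) := by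
            rw [rep_cons_pos _ _ _ _ _ (by simp [List.isPrefixOf])]
            rw [show List.drop (['a','p','o','s',';'] : List Char).length
                  ('a'::'p'::'o'::'s'::';':: rep '&' ['q','u','o','t',';'] ['"'] u)
                = rep '&' ['q','u','o','t',';'] ['"'] u from rfl]
            simp
          rw [hct, e1, e2, rep_pass _ _ _ _ _ (by decide), rep_pass _ _ _ _ _ (by decide)]
          rw [substEnt, if_neg (by rw [← hct]; exact hq), if_pos (by simp [List.isPrefixOf])]
          rw [show List.drop 5 ('a'::'p'::'o'::'s'::';'::u) = u from rfl]
          exact congrArg _ (ih u hlen)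
        · by_cases hx : (['&','#','x','2','7',';'] : List Char).isPrefixOf (c :: t) = true
          · obtain ⟨u, hu⟩ := (List.isPrefixOf_iff_prefix.mp hx)
            have hct : c :: t = '&'::'#'::'x'::'2'::'7'::';'::u := hu.symm
            have hlen : u.length ≤ m := by
              have h := hs; rw [hct] at h; simp only [List.length_cons] at h; omega
            have e1 : rep '&' ['q','u','o','t',';'] ['"'] ('&'::'#'::'x'::'2'::'7'::';'::u)
                = '&'::'#'::'x'::'2'::'7'::';':: rep '&' ['q','u','o','t',';'] ['"'] u := by
              rw [rep_cons_neg _ _ _ _ _ (by rw [← hct]; exact hq),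
                  rep_pass _ _ _ _ _ (by decide), rep_pass _ _ _ _ _ (by decide),
                  rep_pass _ _ _ _ _ (by decide), rep_pass _ _ _ _ _ (by decide),
                  rep_pass _ _ _ _ _ (by decide)]
            have e2 : rep '&' ['a','p','o','s',';'] ['\'']
                  ('&'::'#'::'x'::'2'::'7'::';':: rep '&' ['q','u','o','t',';'] ['"'] u)
                = '&'::'#'::'x'::'2'::'7'::';':: rep '&' ['a','p','o','s',';'] ['\'']
                    (rep '&' ['q','u','o','t',';'] ['"'] u) := by
              rw [rep_cons_neg _ _ _ _ _ (by simp [List.isPrefixOf]),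
                  rep_pass _ _ _ _ _ (by decide), rep_pass _ _ _ _ _ (by decide),
                  rep_pass _ _ _ _ _ (by decide), rep_pass _ _ _ _ _ (by decide),
                  rep_pass _ _ _ _ _ (by decide)]
            have e3 : rep '&' ['#','x','2','7',';'] ['\'']
                  ('&'::'#'::'x'::'2'::'7'::';':: rep '&' ['a','p','o','s',';'] ['\'']
                    (rep '&' ['q','u','o','t',';'] ['"'] u))
                = '\'' :: rep '&' ['#','x','2','7',';'] ['\'']
                    (rep '&' ['a','p','o','s',';'] ['\'']
                      (rep '&' ['q','u','o','t',';'] ['"'] u)) := by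
              rw [rep_cons_pos _ _ _ _ _ (by simp [List.isPrefixOf])]
              rw [show List.drop (['#','x','2','7',';'] : List Char).length
                    ('#'::'x'::'2'::'7'::';':: rep '&' ['a','p','o','s',';'] ['\'']
                      (rep '&' ['q','u','o','t',';'] ['"'] u))
                  = rep '&' ['a','p','o','s',';'] ['\'']
                      (rep '&' ['q','u','o','t',';'] ['"'] u) from rfl]
              simp
            rw [hct, e1, e2, e3, rep_pass _ _ _ _ _ (by decide)]
            rw [substEnt, if_neg (by rw [← hct]; exact hq), if_neg (by rw [← hct]; exact ha),
                if_pos (by simp [List.isPrefixOf])]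
            rw [show List.drop 5 ('#'::'x'::'2'::'7'::';'::u) = u from rfl]
            exact congrArg _ (ih u hlen)
          · -- no entity starts here: all four replaces step over c
            have ht : t.length ≤ m := by
              have h := hs; simp only [List.length_cons] at h; omega
            have h1 : rep '&' ['q','u','o','t',';'] ['"'] (c :: t)
                = c :: rep '&' ['q','u','o','t',';'] ['"'] t := rep_cons_neg _ _ _ _ _ hq
            have hna : ¬ (['&','a','p','o','s',';'] : List Char).isPrefixOf
                (c :: rep '&' ['q','u','o','t',';'] ['"'] t) = true := by
              intro hpre
              have hp : (['&','a','p','o','s',';'] : List Char)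
                  <+: rep '&' ['q','u','o','t',';'] ['"'] (c :: t) := by
                rw [h1]; exact List.isPrefixOf_iff_prefix.mp hpre
              have := rep_prefix_mono '&' ['q','u','o','t',';'] '"' []
                (c :: t).length (c :: t) (Nat.le_refl _) ['&','a','p','o','s',';']
                (by simp) hp
              exact ha (List.isPrefixOf_iff_prefix.mpr this)
            have h2 : rep '&' ['a','p','o','s',';'] ['\'']
                  (rep '&' ['q','u','o','t',';'] ['"'] (c :: t))
                = c :: rep '&' ['a','p','o','s',';'] ['\'']
                    (rep '&' ['q','u','o','t',';'] ['"'] t) := by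
              rw [h1]; exact rep_cons_neg _ _ _ _ _ hna
            have hxt : ¬ (['&','#','x','2','7',';'] : List Char).isPrefixOf
                (c :: rep '&' ['a','p','o','s',';'] ['\'']
                  (rep '&' ['q','u','o','t',';'] ['"'] t)) = true := by
              intro hpre
              have hp : (['&','#','x','2','7',';'] : List Char)
                  <+: rep '&' ['a','p','o','s',';'] ['\'']
                      (rep '&' ['q','u','o','t',';'] ['"'] (c :: t)) := by
                rw [h2]; exact List.isPrefixOf_iff_prefix.mp hpre
              have s1 := rep_prefix_mono '&' ['a','p','o','s',';'] '\'' []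
                _ _ (Nat.le_refl _) ['&','#','x','2','7',';'] (by simp) hp
              have s2 := rep_prefix_mono '&' ['q','u','o','t',';'] '"' []
                _ _ (Nat.le_refl _) ['&','#','x','2','7',';'] (by simp) s1
              exact hx (List.isPrefixOf_iff_prefix.mpr s2)
            have h3 : rep '&' ['#','x','2','7',';'] ['\'']
                  (rep '&' ['a','p','o','s',';'] ['\'']
                    (rep '&' ['q','u','o','t',';'] ['"'] (c :: t)))
                = c :: rep '&' ['#','x','2','7',';'] ['\'']
                    (rep '&' ['a','p','o','s',';'] ['\'']
                      (rep '&' ['q','u','o','t',';'] ['"'] t)) := by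
              rw [h2]; exact rep_cons_neg _ _ _ _ _ hxt
            have hxd : ¬ (['&','#','x','2','7',';'] : List Char).isPrefixOf
                (c :: rep '&' ['#','x','2','7',';'] ['\'']
                  (rep '&' ['a','p','o','s',';'] ['\'']
                    (rep '&' ['q','u','o','t',';'] ['"'] t))) = true := by
              intro hpre
              have hp : (['&','#','x','2','7',';'] : List Char)
                  <+: rep '&' ['#','x','2','7',';'] ['\'']
                      (rep '&' ['a','p','o','s',';'] ['\'']
                        (rep '&' ['q','u','o','t',';'] ['"'] (c :: t))) := by
                rw [h3]; exact List.isPrefixOf_iff_prefix.mp hpre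
              have s1 := rep_prefix_mono '&' ['#','x','2','7',';'] '\'' []
                _ _ (Nat.le_refl _) ['&','#','x','2','7',';'] (by simp) hp
              have s2 := rep_prefix_mono '&' ['a','p','o','s',';'] '\'' []
                _ _ (Nat.le_refl _) ['&','#','x','2','7',';'] (by simp) s1
              have s3 := rep_prefix_mono '&' ['q','u','o','t',';'] '"' []
                _ _ (Nat.le_refl _) ['&','#','x','2','7',';'] (by simp) s2
              exact hx (List.isPrefixOf_iff_prefix.mpr s3)
            rw [h3, rep_cons_neg _ _ _ _ _ hxd]
            rw [substEnt, if_neg hq, if_neg ha, if_neg hx]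
            exact congrArg _ (ih t ht)

-- a String equals ofList of anything its char list equals
lemma str_eq_ofList (s : String) (l : List Char) (h : s.toList = l) : s = String.ofList l := by
  rw [← h, String.ofList_toList]

-- per-token equality of the two cleaners
lemma token_eq (t : String) :
    PySem.Str.replace
      (PySem.Str.replace
        (PySem.Str.replace (PySem.Str.replace (PySem.Str.strip t) "&quot;" "\"") "&apos;" "'")
        "&#x27;" "'") "&#x27;" "\""
    = String.ofList (substEnt (PySem.Chars.strip t.toList)) := by
  apply str_eq_ofList
  simp only [PySem.Str.toList_replace, PySem.Str.toList_strip]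
  rw [show ("&quot;" : String).toList = ['&','q','u','o','t',';'] from rfl,
      show ("&apos;" : String).toList = ['&','a','p','o','s',';'] from rfl,
      show ("&#x27;" : String).toList = ['&','#','x','2','7',';'] from rfl,
      show ("\"" : String).toList = ['"'] from rfl,
      show ("'" : String).toList = ['\''] from rfl]
  rw [replace_eq_rep, replace_eq_rep, replace_eq_rep, replace_eq_rep]
  exact master (PySem.Chars.strip t.toList).length _ (Nat.le_refl _)

-- ===== VERDICT (by name: the statement is the Claim_ definition above) =====
theorem clean_this_spec : Claim_equal_clean_this := by
  intro text _
  show clean_this text = clean_this_alt text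
  unfold clean_this clean_this_alt
  refine List.foldl_ext _ _ _ (fun acc t _ => ?_)
  show acc ++ [PySem.Str.replace
      (PySem.Str.replace
        (PySem.Str.replace (PySem.Str.replace (PySem.Str.strip t) "&quot;" "\"") "&apos;" "'")
        "&#x27;" "'") "&#x27;" "\""]
    = acc ++ [String.ofList (substEnt (PySem.Chars.strip t.toList))]
  rw [token_eq t]
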